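-- pv_equiv track=rewrite | github.com/azario0/project_euler | problem1.py | mul_3_rec
-- ===== SOURCE A (Python) =====
-- def mul_3_rec(tab,rg):
--     if rg<0:
--         return tab
--     else :
--         if rg%3==0 or rg%5==0:
--             tab.append(int(rg))
--         rg=rg-1
--         tab=mul_3_rec(tab,rg)
--     return tab
-- ===== SOURCE B (Python) =====
-- def mul_3_rec(tab, rg):
--     tab += [k for k in range(rg, -1, -1) if k % 3 == 0 or k % 5 == 0]
--     return tab
-- ===== Notes on version B (the rewrite author's own statement) =====
-- stated objective: idiomatic
-- what changed: Replaces A's self-recursion (one stack frame per counter value, appending per call) with a single list-comprehension filter over range(rg, -1, -1) extended onto tab in place.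
import Mathlib
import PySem

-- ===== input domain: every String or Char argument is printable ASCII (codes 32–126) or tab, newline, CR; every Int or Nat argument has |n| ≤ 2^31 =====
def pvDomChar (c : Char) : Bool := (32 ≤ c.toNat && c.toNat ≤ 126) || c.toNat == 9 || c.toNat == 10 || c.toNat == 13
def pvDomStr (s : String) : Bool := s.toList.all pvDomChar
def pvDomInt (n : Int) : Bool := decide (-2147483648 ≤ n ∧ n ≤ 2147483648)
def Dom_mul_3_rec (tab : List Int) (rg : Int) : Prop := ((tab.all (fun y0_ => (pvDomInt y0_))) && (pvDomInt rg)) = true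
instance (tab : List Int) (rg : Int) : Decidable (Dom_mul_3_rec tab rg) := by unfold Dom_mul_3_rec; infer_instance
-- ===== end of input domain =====

-- B replaces A's recursive descent by a single list comprehension over range(rg, -1, -1)
-- (idiomatic; same return value; like A it extends the caller's list in place).

-- ===== PORT A =====
-- literal transliteration of A's recursion (tab.append x ≙ tab ++ [x])
def mul_3_rec (tab : List Int) (rg : Int) : List Int :=
  if h : rg < 0 then tab
  else
    let tab' := if PySem.Int.mod rg 3 == 0 || PySem.Int.mod rg 5 == 0 then tab ++ [rg] else tab
    mul_3_rec tab' (rg - 1)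
termination_by (rg + 1).toNat
decreasing_by omega

-- ===== PORT B =====
-- literal transliteration of Source B: tab += [k for k in range(rg, -1, -1) if k%3==0 or k%5==0]
def mul_3_rec_alt (tab : List Int) (rg : Int) : List Int :=
  tab ++ (PySem.List.pyRange rg (-1) (-1)).filter
           (fun k => PySem.Int.mod k 3 == 0 || PySem.Int.mod k 5 == 0)

-- ===== PRECONDITION & SPEC =====
-- Pre_ excludes rg > 9900: the recursion of Python A needs one stack frame per counter value, so
-- beyond the interpreter's recursion limit (10000 frames here) A raises RecursionError and returns
-- no value; the margin below the limit only keeps safely clear of its exact, stack-depth-dependent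
-- cut-off.
def Pre_mul_3_rec (_tab : List Int) (rg : Int) : Prop := rg ≤ 9900
instance (_tab : List Int) (_rg : Int) : Decidable (Pre_mul_3_rec _tab _rg) := by unfold Pre_mul_3_rec; infer_instance
def pvWitness_mul_3_rec : List Int × Int := ([7, -2], 16)

def Spec_mul_3_rec (tab : List Int) (rg : Int) (out : List Int) : Prop := out = mul_3_rec_alt tab rg
instance (tab : List Int) (rg : Int) (out : List Int) : Decidable (Spec_mul_3_rec tab rg out) := by unfold Spec_mul_3_rec; infer_instance

-- ===== CLAIM (what is proved, stated in full; the proofs are below) =====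
def Claim_equal_mul_3_rec : Prop := ∀ (tab : List Int) (rg : Int), Dom_mul_3_rec tab rg → Pre_mul_3_rec tab rg → Spec_mul_3_rec tab rg (mul_3_rec tab rg)

-- ===== LEMMAS AND PROOFS =====

lemma pyRange_neg_one_nil (rg : Int) (h : rg < 0) :
    PySem.List.pyRange rg (-1) (-1) = [] := by
  simp only [PySem.List.pyRange]
  norm_num
  omega

lemma pyRange_neg_one_cons (rg : Int) (h : 0 ≤ rg) :
    PySem.List.pyRange rg (-1) (-1) = rg :: PySem.List.pyRange (rg - 1) (-1) (-1) := by
  simp only [PySem.List.pyRange, Int.reduceNeg, neg_eq_zero, one_ne_zero, ↓reduceIte, neg_mul,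
    one_mul, Int.neg_pos, Int.reduceLT, sub_neg_eq_add, neg_neg, add_sub_cancel_right,
    EuclideanDomain.div_one, neg_lt_sub_iff_lt_add, lt_add_iff_pos_right, sub_add_cancel]
  rw [show (if -1 < rg then (rg + 1).toNat else 0) = rg.toNat + 1 by split <;> omega,
      show (if 0 < rg then rg.toNat else 0) = rg.toNat by split <;> omega,
      List.range_succ_eq_map]
  simp only [List.map_cons, List.map_map]
  have h0 : rg + -((0:Nat):Int) = rg := by norm_num
  rw [h0]
  congr 1
  apply List.map_congr_left
  intro a _
  simp only [Function.comp_apply, Nat.succ_eq_add_one]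
  push_cast
  ring

lemma mul_3_rec_eq_alt : ∀ (n : Nat) (rg : Int), rg < (n : Int) → ∀ (tab : List Int),
    mul_3_rec tab rg = mul_3_rec_alt tab rg := by
  intro n
  induction n with
  | zero =>
      intro rg h tab
      rw [mul_3_rec.eq_def, mul_3_rec_alt, pyRange_neg_one_nil rg (by omega)]
      simp [show rg < 0 by omega]
  | succ m ih =>
      intro rg h tab
      by_cases hneg : rg < 0
      · rw [mul_3_rec.eq_def, mul_3_rec_alt, pyRange_neg_one_nil rg hneg]
        simp [hneg]
      · rw [mul_3_rec.eq_def, dif_neg hneg]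
        rw [ih (rg - 1) (by omega)]
        unfold mul_3_rec_alt
        rw [pyRange_neg_one_cons rg (by omega), List.filter_cons]
        by_cases hc : (PySem.Int.mod rg 3 == 0 || PySem.Int.mod rg 5 == 0) = true
        · rw [if_pos hc, if_pos hc]
          simp
        · rw [if_neg hc, if_neg hc]

-- ===== VERDICT (by name: the statement is the Claim_ definition above) =====
theorem mul_3_rec_spec : Claim_equal_mul_3_rec := by
  intro tab rg _ hpre
  unfold Spec_mul_3_rec
  unfold Pre_mul_3_rec at hpre
  exact mul_3_rec_eq_alt 9901 rg (by omega) tab
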